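-- pv_equiv track=rewrite | github.com/CMG-GUTS/metataxonx | bin/python/validate_mapping.py | check_characters
-- ===== SOURCE A (Python) =====
-- import string
--
-- def column_string(n):
--     """go from integer to Excel column letter"""
--     rest = n
--     string = ""
--     while rest > 0:
--         module = (rest - 1) % 26
--         string = chr(65 + module) + string
--         rest = int((rest - module) / 26)
--     return string
--
-- def check_cell(errors, cell, allowed_list, column_index, row_index):
--     # check for illegal characters in the supplied cell string; used by "check_characters". allowed_list is a list of strings.
--     okchars = ""
--     for element in allowed_list:
--         okchars += element
--     for letter in cell:
--         if letter not in okchars: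
--             errors.append(
--                 'Invalid character in cell %s%i: "%s"\n' % (column_string(column_index + 1), row_index + 1, letter))
--     return errors
--
-- def check_characters(lines, errors):
--     # check for illegal characters
--     header = lines[0].split('\t')
--     for column_i, column_header in enumerate(header):
--         for line_i, line in enumerate(lines):
--             if column_header.split('_')[0].upper() in header_keywords:
--                 cell = line.split('\t')[column_i]
--                 errors = check_cell(errors, cell, [digits, letters, '_'], column_i, line_i)
--     return errors
--
-- letters = string.ascii_uppercase + string.ascii_lowercase
--
-- digits = string.digits
--
-- header_keywords = ['RANKSTAT', 'FILE', 'CORRELATION', 'PAIREDGROUPBY', 'PAIREDTIMEPOINT', 'PAIREDCLASS']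
-- ===== SOURCE B (Python) =====
-- # B: precompute the keyword columns and the column letter once per column, then flag
-- # illegal characters with a regex scan (re.ASCII \W == not [A-Za-z0-9_]) instead of a
-- # per-character membership loop over a concatenated allowed-characters string.
-- # Like A, it appends the messages to the caller's `errors` list in place.
-- import re
-- import string
--
-- letters = string.ascii_uppercase + string.ascii_lowercase
-- digits = string.digits
-- header_keywords = ['RANKSTAT', 'FILE', 'CORRELATION', 'PAIREDGROUPBY', 'PAIREDTIMEPOINT', 'PAIREDCLASS']
--
-- _NONWORD = re.compile(r'\W', re.ASCII)
--
-- def column_string(n):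
--     """go from integer to Excel column letter"""
--     rest = n
--     s = ""
--     while rest > 0:
--         module = (rest - 1) % 26
--         s = chr(65 + module) + s
--         rest = int((rest - module) / 26)
--     return s
--
-- def check_characters(lines, errors):
--     header = lines[0].split('\t')
--     keyword_cols = [i for i, h in enumerate(header)
--                     if h.split('_')[0].upper() in header_keywords]
--     for i in keyword_cols:
--         col = column_string(i + 1)
--         for row, line in enumerate(lines):
--             cell = line.split('\t')[i]
--             errors.extend('Invalid character in cell %s%i: "%s"\n' % (col, row + 1, m.group())
--                           for m in _NONWORD.finditer(cell))
--     return errors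
-- ===== Notes on version B (the rewrite author's own statement) =====
-- stated objective: faster
-- what changed: B precomputes the keyword columns and each Excel column letter once, then flags illegal characters with a compiled re.ASCII \W regex scan per cell (one C-level pattern pass per cell, one match per non-word character in order) instead of A's per-character Python membership loop over an allowed-characters string freshly re-concatenated for every cell.
import Mathlib
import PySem

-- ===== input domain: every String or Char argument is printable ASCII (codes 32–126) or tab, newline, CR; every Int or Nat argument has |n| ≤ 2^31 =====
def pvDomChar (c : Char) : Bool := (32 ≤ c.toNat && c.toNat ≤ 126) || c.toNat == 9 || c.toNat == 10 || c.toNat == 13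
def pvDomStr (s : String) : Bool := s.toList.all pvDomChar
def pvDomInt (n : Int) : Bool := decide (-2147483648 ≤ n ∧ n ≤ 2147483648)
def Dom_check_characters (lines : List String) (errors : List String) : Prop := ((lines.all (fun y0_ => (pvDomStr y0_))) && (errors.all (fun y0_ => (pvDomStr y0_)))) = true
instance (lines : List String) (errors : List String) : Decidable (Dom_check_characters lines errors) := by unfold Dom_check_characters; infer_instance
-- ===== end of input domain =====

-- B replaces A's per-character membership loop over a concatenated allowed-characters
-- string by a regex-style word-character class scan (re.ASCII \W), after precomputing the
-- keyword columns and each column letter once; equivalence is about the RETURN value (both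
-- Pythons also append the same messages to the caller's `errors` list in place).

-- ===== shared module constants and helpers (identical source in Source A and Source B) =====
def pv_letters : String := "ABCDEFGHIJKLMNOPQRSTUVWXYZabcdefghijklmnopqrstuvwxyz"
def pv_digits : String := "0123456789"
def pv_header_keywords : List String :=
  ["RANKSTAT", "FILE", "CORRELATION", "PAIREDGROUPBY", "PAIREDTIMEPOINT", "PAIREDCLASS"]

-- column_string's while loop (identical helper in Source A and Source B); string built as List Char
-- (exact: Python prepends one chr per step).  int((rest - module) / 26) is exact truncating
-- float division; dividend is ≥ 0 and ≡ 1 (mod 26) on every iteration, so floordiv is exact.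
def column_string_go (rest : Int) (acc : List Char) : List Char :=
  if 0 < rest then
    let module := PySem.Int.mod (rest - 1) 26
    column_string_go (PySem.Int.floordiv (rest - module) 26)
      (Char.ofNat (65 + module).toNat :: acc)
  else acc
termination_by rest.toNat
decreasing_by
  rw [PySem.Int.mod_eq_emod_of_pos (by norm_num : (0:Int) < 26),
      PySem.Int.floordiv_eq_ediv_of_pos (by norm_num : (0:Int) < 26)]
  omega

def column_string (n : Int) : String := String.ofList (column_string_go n [])

-- 'Invalid character in cell %s%i: "%s"\n' % (col, rowNum, letter); %i of a positive int is
-- its decimal digits (PySem.Int.toStr); concatenation tracked on List Char (exact).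
def pv_msg (col : String) (rowNum : Int) (letter : Char) : String :=
  String.ofList ("Invalid character in cell ".toList ++ col.toList ++
    (PySem.Int.toStr rowNum).toList ++ ": \"".toList ++ [letter] ++ "\"\n".toList)

-- the header test `column_header.split('_')[0].upper() in header_keywords` (same expression
-- in both Pythons); split('_')[0] is total since split with a separator is never empty
-- s.split(sep) with a non-empty separator (the only uses: '\\t' and '_'); split? is none only for sep=""
def pv_split (s : String) (sep : String) : List String := (PySem.Str.split? s sep).getD []

def pv_is_keyword (h : String) : Bool :=
  pv_header_keywords.contains (PySem.Str.upper ((pv_split h "_").headD ""))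

-- ===== PORT A =====
def check_cell (errors : List String) (cell : String) (allowed_list : List String)
    (column_index : Int) (row_index : Int) : List String :=
  let okchars : List Char := allowed_list.foldl (fun s e => s ++ e.toList) []
  cell.toList.foldl
    (fun errs letter =>
      if !(okchars.contains letter) then
        errs ++ [pv_msg (column_string (column_index + 1)) (row_index + 1) letter]
      else errs)
    errors

def check_characters (lines : List String) (errors : List String) : List String :=
  -- lines[0]: none = IndexError, excluded by Pre_; likewise line.split('\t')[column_i]
  let header := pv_split ((PySem.List.pyGet? lines 0).getD "") "\t"
  (PySem.List.enumerate header).foldl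
    (fun errors p =>
      (PySem.List.enumerate lines).foldl
        (fun errors q =>
          if pv_is_keyword p.2 then
            let cell := (PySem.List.pyGet? (pv_split q.2 "\t") p.1).getD ""
            check_cell errors cell [pv_digits, pv_letters, "_"] p.1 q.1
          else errors)
        errors)
    errors

-- ===== PORT B =====
-- re.ASCII \w character class: [A-Za-z0-9_]; a \W finditer pass yields exactly the
-- non-word characters of the cell, one match per occurrence, in positional order.
def pv_isWordChar (c : Char) : Bool :=
  ('0' ≤ c && c ≤ '9') || ('A' ≤ c && c ≤ 'Z') || ('a' ≤ c && c ≤ 'z') || c == '_'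

def check_characters_alt (lines : List String) (errors : List String) : List String :=
  let header := pv_split ((PySem.List.pyGet? lines 0).getD "") "\t"
  let keyword_cols := ((PySem.List.enumerate header).filter (fun p => pv_is_keyword p.2)).map (fun p => p.1)
  keyword_cols.foldl
    (fun errs i =>
      let col := column_string (i + 1)
      (PySem.List.enumerate lines).foldl
        (fun errs2 q =>
          let cell := (PySem.List.pyGet? (pv_split q.2 "\t") i).getD ""
          errs2 ++ (cell.toList.filter (fun ch => !(pv_isWordChar ch))).map
            (fun ch => pv_msg col (q.1 + 1) ch))
        errs)
    errors

-- ===== PRECONDITION & SPEC =====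
-- Pre_ excludes exactly the inputs where Python A raises IndexError: an empty `lines`
-- (lines[0]) and lines with fewer tab-separated fields than a keyword column's index.
def Pre_check_characters (lines : List String) (errors : List String) : Prop :=
  lines ≠ [] ∧
  ∀ p ∈ PySem.List.enumerate (pv_split (lines.headD "") "\t"),
    pv_is_keyword p.2 = true →
    ∀ line ∈ lines, p.1 < ((pv_split line "\t").length : Int)
instance (lines : List String) (errors : List String) : Decidable (Pre_check_characters lines errors) := by
  unfold Pre_check_characters; infer_instance

def pvWitness_check_characters : List String × List String :=
  (["FILE\tNAME", "ok!\tz z"], [])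

def Spec_check_characters (lines : List String) (errors : List String) (out : List String) : Prop := out = check_characters_alt lines errors
instance (lines : List String) (errors : List String) (out : List String) : Decidable (Spec_check_characters lines errors out) := by unfold Spec_check_characters; infer_instance

-- ===== CLAIM (what is proved, stated in full; the proofs are below) =====
def Claim_equal_check_characters : Prop := ∀ (lines : List String) (errors : List String), Dom_check_characters lines errors → Pre_check_characters lines errors → Spec_check_characters lines errors (check_characters lines errors)

-- ===== LEMMAS AND PROOFS =====
theorem char_eq_iff_toNat (a b : Char) : a = b ↔ a.toNat = b.toNat :=
  ⟨fun h => by rw [h], fun h => Char.ext (UInt32.toNat_inj.mp h)⟩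

theorem char_le_iff_toNat (a b : Char) : a ≤ b ↔ a.toNat ≤ b.toNat := Iff.rfl

set_option maxRecDepth 8192 in
theorem digits_mem (c : Char) : (pv_digits.toList.contains c) = ('0' ≤ c && c ≤ '9') := by
  have h : pv_digits.toList = ['0','1','2','3','4','5','6','7','8','9'] := rfl
  rw [h, Bool.eq_iff_iff]
  simp only [List.contains_cons, List.contains_nil, Bool.or_false, Bool.or_eq_true,
    beq_iff_eq, Bool.and_eq_true, decide_eq_true_eq, char_eq_iff_toNat, char_le_iff_toNat,
    Char.reduceToNat]
  omega

set_option maxRecDepth 8192 in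
theorem upper_mem (c : Char) :
    ("ABCDEFGHIJKLMNOPQRSTUVWXYZ".toList.contains c) = ('A' ≤ c && c ≤ 'Z') := by
  have h : "ABCDEFGHIJKLMNOPQRSTUVWXYZ".toList =
      ['A','B','C','D','E','F','G','H','I','J','K','L','M','N','O','P','Q','R','S','T','U','V','W','X','Y','Z'] := rfl
  rw [h, Bool.eq_iff_iff]
  simp only [List.contains_cons, List.contains_nil, Bool.or_false, Bool.or_eq_true,
    beq_iff_eq, Bool.and_eq_true, decide_eq_true_eq, char_eq_iff_toNat, char_le_iff_toNat,
    Char.reduceToNat]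
  omega

set_option maxRecDepth 8192 in
theorem lower_mem (c : Char) :
    ("abcdefghijklmnopqrstuvwxyz".toList.contains c) = ('a' ≤ c && c ≤ 'z') := by
  have h : "abcdefghijklmnopqrstuvwxyz".toList =
      ['a','b','c','d','e','f','g','h','i','j','k','l','m','n','o','p','q','r','s','t','u','v','w','x','y','z'] := rfl
  rw [h, Bool.eq_iff_iff]
  simp only [List.contains_cons, List.contains_nil, Bool.or_false, Bool.or_eq_true,
    beq_iff_eq, Bool.and_eq_true, decide_eq_true_eq, char_eq_iff_toNat, char_le_iff_toNat,
    Char.reduceToNat]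
  omega

-- the concatenated okchars of A's check_cell is exactly B's \w character class
theorem okchars_eq (c : Char) :
    (([pv_digits, pv_letters, "_"].foldl (fun s (e : String) => s ++ e.toList) []).contains c)
      = pv_isWordChar c := by
  have h : [pv_digits, pv_letters, "_"].foldl (fun s (e : String) => s ++ e.toList) [] =
      pv_digits.toList ++ ("ABCDEFGHIJKLMNOPQRSTUVWXYZ".toList ++
        ("abcdefghijklmnopqrstuvwxyz".toList ++ ['_'])) := rfl
  rw [h]
  simp only [List.contains_append, digits_mem, upper_mem, lower_mem, pv_isWordChar,
    List.contains_cons, List.contains_nil, Bool.or_false, Bool.or_assoc]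

-- A's per-cell character loop appends exactly one message per non-word character, in order
theorem check_cell_eq (errors : List String) (cell : String) (ci ri : Int) :
    check_cell errors cell [pv_digits, pv_letters, "_"] ci ri =
      errors ++ (cell.toList.filter (fun ch => !(pv_isWordChar ch))).map
        (fun ch => pv_msg (column_string (ci + 1)) (ri + 1) ch) := by
  simp only [check_cell]
  have hbody : (fun (errs : List String) letter =>
      if !(([pv_digits, pv_letters, "_"].foldl (fun s (e : String) => s ++ e.toList) []).contains letter) then
        errs ++ [pv_msg (column_string (ci + 1)) (ri + 1) letter]
      else errs)
      = (fun (errs : List String) letter =>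
        if (fun ch => !(pv_isWordChar ch)) letter then
          errs ++ [(fun ch => pv_msg (column_string (ci + 1)) (ri + 1) ch) letter]
        else errs) := by
    funext errs letter
    rw [okchars_eq]
  rw [hbody, PySem.List.foldl_append_if]

theorem check_characters_spec : Claim_equal_check_characters := by
  intro lines errors _hDom _hPre
  unfold Spec_check_characters
  simp only [check_characters, check_characters_alt]
  -- name the pieces
  generalize pv_split ((PySem.List.pyGet? lines 0).getD "") "\t" = header
  -- A's inner loop: the keyword test does not depend on the line, pull it out
  have hA : ∀ (p : Int × String) (errs : List String),
      (PySem.List.enumerate lines).foldl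
        (fun errors q =>
          if pv_is_keyword p.2 then
            check_cell errors ((PySem.List.pyGet? (pv_split q.2 "\t") p.1).getD "")
              [pv_digits, pv_letters, "_"] p.1 q.1
          else errors) errs
      = if pv_is_keyword p.2 then
          (PySem.List.enumerate lines).foldl
            (fun errs2 q =>
              errs2 ++ (((PySem.List.pyGet? (pv_split q.2 "\t") p.1).getD "").toList.filter
                  (fun ch => !(pv_isWordChar ch))).map
                (fun ch => pv_msg (column_string (p.1 + 1)) (q.1 + 1) ch)) errs
        else errs := by
    intro p errs
    cases hk : pv_is_keyword p.2
    · simp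
    · simp [check_cell_eq]
  simp only [hA]
  rw [PySem.List.foldl_if_eq_foldl_filter (p := fun p : Int × String => pv_is_keyword p.2),
      List.foldl_map]

-- ===== VERDICT (by name: the statement is the Claim_ definition above) =====
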